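-- pv_equiv track=rewrite | github.com/hjc2/asfl | scripts/summary.py | merge_nested_dict
-- ===== SOURCE A (Python) =====
-- def merge_nested_dict(nested_dict):
--     result = {}
--
--     # Get all unique keys (e.g., 1, 2, 3, 4, 5)
--     all_keys = set()
--     for field_data in nested_dict.values():
--         all_keys.update(dict(field_data).keys())
--
--     # Merge the data
--     for key in all_keys:
--         result[key] = {}
--         for field, data in nested_dict.items():
--             dict_data = dict(data)
--             if key in dict_data:
--                 result[key][field] = dict_data[key]
--
--     return result
-- ===== SOURCE B (Python) =====
-- def merge_nested_dict(nested_dict):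
--     # Flatten the nested mapping into (key, field, value) triples, then fold the
--     # flat stream into the transposed mapping.
--     triples = [(key, field, value)
--                for field, data in nested_dict.items()
--                for key, value in data.items()]
--     result = {}
--     for key, field, value in triples:
--         result.setdefault(key, {})[field] = value
--     return result
-- ===== Notes on version B (the rewrite author's own statement) =====
-- stated objective: faster
-- what changed: Replaced A's two-phase algorithm (collect a global key set from each field's dict, then for each key rescan every field and rebuild dict(data) to test membership) by flattening the input into a flat list of (key, field, value) triples and folding that flat stream once into the transposed mapping with result.setdefault(key, {})[field] = value.
import Mathlib
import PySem

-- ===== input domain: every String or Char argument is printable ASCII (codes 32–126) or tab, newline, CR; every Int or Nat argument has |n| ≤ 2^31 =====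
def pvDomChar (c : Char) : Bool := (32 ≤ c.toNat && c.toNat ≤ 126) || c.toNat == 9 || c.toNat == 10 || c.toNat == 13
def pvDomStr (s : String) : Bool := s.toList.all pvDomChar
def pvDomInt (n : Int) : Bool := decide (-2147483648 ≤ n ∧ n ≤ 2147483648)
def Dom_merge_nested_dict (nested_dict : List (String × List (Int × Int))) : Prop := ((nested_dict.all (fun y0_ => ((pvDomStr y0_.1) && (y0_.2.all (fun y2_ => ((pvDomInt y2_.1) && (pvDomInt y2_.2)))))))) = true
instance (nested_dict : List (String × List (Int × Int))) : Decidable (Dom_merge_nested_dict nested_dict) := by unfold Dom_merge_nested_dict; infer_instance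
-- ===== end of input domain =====

-- B replaces A's two-phase algorithm (collect a global key set, then rescan every field per key,
-- rebuilding dict(data) each time) by flattening the input into a flat stream of
-- (key, field, value) triples and folding that stream once into the transposed dict (objective:
-- faster, one pass over the entries instead of a key × field rescan).
-- Python A iterates over a set (hash order); the returned dicts are compared as dicts
-- (order-insensitively), so the ports fix the set's insertion order without loss.

-- ===== PORT A =====
def merge_nested_dict (nested_dict : List (String × List (Int × Int))) : List (Int × List (String × Int)) :=
  -- all_keys = set(); for field_data in nested_dict.values(): all_keys.update(dict(field_data).keys())
  let allKeys : PySem.Set Int :=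
    nested_dict.foldl (fun s fd => PySem.Set.update s (PySem.Dict.ofList fd.2).keys) PySem.Set.empty
  -- for key in all_keys: result[key] = {}; for field, data in nested_dict.items(): ...
  let result : PySem.Dict Int (PySem.Dict String Int) :=
    allKeys.foldl
      (fun res key =>
        nested_dict.foldl
          (fun res fd =>
            if (PySem.Dict.ofList fd.2).contains key then
              -- result[key][field] = dict_data[key]
              res.modify key PySem.Dict.empty
                (fun inner => inner.insert fd.1 ((PySem.Dict.ofList fd.2).getD key 0))
            else res)
          (res.insert key PySem.Dict.empty))
      PySem.Dict.empty
  result.items.map (fun p => (p.1, p.2.items))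

-- ===== PORT B =====
def merge_nested_dict_alt (nested_dict : List (String × List (Int × Int))) : List (Int × List (String × Int)) :=
  -- triples = [(key, field, value) for field, data in nested_dict.items() for key, value in data]
  let triples : List (Int × String × Int) :=
    nested_dict.flatMap (fun fd => fd.2.map (fun kv => (kv.1, fd.1, kv.2)))
  -- for key, field, value in triples: result.setdefault(key, {})[field] = value
  let result : PySem.Dict Int (PySem.Dict String Int) :=
    triples.foldl
      (fun res t => res.modify t.1 PySem.Dict.empty (fun inner => inner.insert t.2.1 t.2.2))
      PySem.Dict.empty
  result.items.map (fun p => (p.1, p.2.items))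

-- ===== PRECONDITION & SPEC =====
def Spec_merge_nested_dict (nested_dict : List (String × List (Int × Int))) (out : List (Int × List (String × Int))) : Prop := out = merge_nested_dict_alt nested_dict
instance (nested_dict : List (String × List (Int × Int))) (out : List (Int × List (String × Int))) : Decidable (Spec_merge_nested_dict nested_dict out) := by unfold Spec_merge_nested_dict; infer_instance

-- ===== CLAIM (what is proved, stated in full; the proofs are below) =====
def Claim_equal_merge_nested_dict : Prop := ∀ (nested_dict : List (String × List (Int × Int))), Dom_merge_nested_dict nested_dict → Spec_merge_nested_dict nested_dict (merge_nested_dict nested_dict)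

-- ===== LEMMAS AND PROOFS =====

-- B's single fold over the flattened triples is the nested fold over the source structure
lemma pv_fold_triples (nd : List (String × List (Int × Int)))
    (res : PySem.Dict Int (PySem.Dict String Int)) :
    (nd.flatMap (fun fd => fd.2.map (fun kv => (kv.1, fd.1, kv.2)))).foldl
      (fun res t => res.modify t.1 PySem.Dict.empty (fun inner => inner.insert t.2.1 t.2.2)) res
    = nd.foldl
        (fun res fd =>
          fd.2.foldl (fun res kv => res.modify kv.1 PySem.Dict.empty (fun inner => inner.insert fd.1 kv.2)) res)
        res := by
  induction nd generalizing res with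
  | nil => rfl
  | cons fd nd ih =>
    simp only [List.flatMap_cons, List.foldl_append, List.foldl_cons, List.foldl_map]
    exact ih _

-- updating a set with set(xs) adds the same elements as updating it with xs
lemma pv_update_ofList {α : Type} [BEq α] [LawfulBEq α] (l : List α) (s : PySem.Set α) :
    PySem.Set.update s (PySem.Set.ofList l) = PySem.Set.update s l := by
  induction l using List.reverseRecOn with
  | nil => rfl
  | append_singleton l x ih =>
    have hof : PySem.Set.ofList (l ++ [x]) = PySem.Set.add (PySem.Set.ofList l) x := by
      simp [PySem.Set.ofList_eq_foldl, List.foldl_append]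
    have hupd : ∀ (t : List α), PySem.Set.update s (t ++ [x]) = PySem.Set.add (PySem.Set.update s t) x := by
      intro t; simp [PySem.Set.update, List.foldl_append]
    rw [hof, hupd]
    by_cases hx : x ∈ PySem.Set.ofList l
    · rw [PySem.Set.add_of_mem hx, ih, PySem.Set.add_of_mem
        ((PySem.Set.mem_update s l x).mpr (Or.inr ((PySem.Set.mem_ofList l x).mp hx)))]
    · rw [PySem.Set.add_of_not_mem hx, hupd, ih]

-- dict(l).keys() = set(l.map fst) as ordered lists
lemma pv_keys_ofList {κ ν : Type} [BEq κ] [LawfulBEq κ] (l : List (κ × ν)) :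
    (PySem.Dict.ofList l).keys = PySem.Set.ofList (l.map Prod.fst) := by
  have := PySem.Dict.keys_foldl_insert_key l Prod.fst (fun _ p => p.2) PySem.Dict.empty
  simpa [PySem.Dict.ofList, PySem.Dict.update, PySem.Dict.keys_empty, PySem.Set.ofList_eq_foldl,
    PySem.Set.update] using this

-- the per-key inner loop of A, started from res with result[key] freshly set to w,
-- only rewrites the entry at key
lemma pv_A_inner (nd : List (String × List (Int × Int))) (k : Int)
    (res : PySem.Dict Int (PySem.Dict String Int)) (w : PySem.Dict String Int) :
    nd.foldl
      (fun res fd =>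
        if (PySem.Dict.ofList fd.2).contains k then
          res.modify k PySem.Dict.empty
            (fun inner => inner.insert fd.1 ((PySem.Dict.ofList fd.2).getD k 0))
        else res)
      (res.insert k w)
    = res.insert k
        (nd.foldl
          (fun inner fd =>
            if (PySem.Dict.ofList fd.2).contains k then
              inner.insert fd.1 ((PySem.Dict.ofList fd.2).getD k 0)
            else inner)
          w) := by
  induction nd generalizing w with
  | nil => rfl
  | cons fd nd ih =>
    simp only [List.foldl_cons]
    by_cases h : (PySem.Dict.ofList fd.2).contains k
    · rw [if_pos h, if_pos h]
      have hm : (res.insert k w).modify k PySem.Dict.empty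
          (fun inner => inner.insert fd.1 ((PySem.Dict.ofList fd.2).getD k 0))
          = res.insert k (w.insert fd.1 ((PySem.Dict.ofList fd.2).getD k 0)) := by
        rw [PySem.Dict.modify, PySem.Dict.getD_insert_self, PySem.Dict.insert_insert_self]
      rw [hm]
      exact ih _
    · rw [if_neg (by simp [h]), if_neg (by simp [h])]
      exact ih w

-- one field's pass of the triple fold, observed at a single key k
lemma pv_B_field (l : List (Int × Int)) (f : String) (k : Int)
    (res : PySem.Dict Int (PySem.Dict String Int)) :
    (l.foldl (fun res kv => res.modify kv.1 PySem.Dict.empty (fun inner => inner.insert f kv.2)) res).getD k PySem.Dict.empty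
    = if (PySem.Dict.ofList l).contains k then
        (res.getD k PySem.Dict.empty).insert f ((PySem.Dict.ofList l).getD k 0)
      else res.getD k PySem.Dict.empty := by
  induction l using List.reverseRecOn with
  | nil => simp [PySem.Dict.ofList, PySem.Dict.update, PySem.Dict.contains_empty]
  | append_singleton l p ih =>
    have hof : PySem.Dict.ofList (l ++ [p]) = (PySem.Dict.ofList l).insert p.1 p.2 := by
      simp [PySem.Dict.ofList, PySem.Dict.update, List.foldl_append]
    rw [List.foldl_append, hof]
    simp only [List.foldl_cons, List.foldl_nil]
    by_cases hk : k = p.1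
    · subst hk
      rw [PySem.Dict.getD_modify, if_pos rfl, ih]
      simp only [PySem.Dict.contains_insert, BEq.rfl, Bool.true_or, if_true,
        PySem.Dict.getD_insert]
      by_cases hc : (PySem.Dict.ofList l).contains p.1
      · simp [hc, PySem.Dict.insert_insert_self]
      · simp [hc]
    · rw [PySem.Dict.getD_modify, if_neg hk, ih]
      have hbeq : (k == p.1) = false := by simp [hk]
      simp only [PySem.Dict.contains_insert, hbeq, Bool.false_or,
        PySem.Dict.getD_insert, if_neg hk]

-- the whole nested fold, observed at a single key k, is exactly A's per-key inner loop
lemma pv_B_getD (nd : List (String × List (Int × Int))) (k : Int)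
    (res : PySem.Dict Int (PySem.Dict String Int)) :
    (nd.foldl
      (fun res fd =>
        fd.2.foldl (fun res kv => res.modify kv.1 PySem.Dict.empty (fun inner => inner.insert fd.1 kv.2)) res)
      res).getD k PySem.Dict.empty
    = nd.foldl
        (fun inner fd =>
          if (PySem.Dict.ofList fd.2).contains k then
            inner.insert fd.1 ((PySem.Dict.ofList fd.2).getD k 0)
          else inner)
        (res.getD k PySem.Dict.empty) := by
  induction nd generalizing res with
  | nil => rfl
  | cons fd nd ih =>
    simp only [List.foldl_cons]
    rw [ih, pv_B_field]

-- the keys accumulated by the nested fold are exactly A's all_keys fold (over the raw key lists)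
lemma pv_B_keys (nd : List (String × List (Int × Int)))
    (res : PySem.Dict Int (PySem.Dict String Int)) :
    (nd.foldl
      (fun res fd =>
        fd.2.foldl (fun res kv => res.modify kv.1 PySem.Dict.empty (fun inner => inner.insert fd.1 kv.2)) res)
      res).keys
    = nd.foldl (fun ks fd => PySem.Set.update ks (fd.2.map Prod.fst)) res.keys := by
  induction nd generalizing res with
  | nil => rfl
  | cons fd nd ih =>
    simp only [List.foldl_cons]
    rw [ih, PySem.Dict.keys_foldl_modify_key fd.2 (fun kv => kv.1) PySem.Dict.empty
      (fun _ kv => fun inner => inner.insert fd.1 kv.2)]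

-- A's all_keys fold equals the same fold over the raw (undeduplicated) key lists
lemma pv_allKeys_raw (nd : List (String × List (Int × Int))) (s : PySem.Set Int) :
    nd.foldl (fun s fd => PySem.Set.update s (PySem.Dict.ofList fd.2).keys) s
    = nd.foldl (fun ks fd => PySem.Set.update ks (fd.2.map Prod.fst)) s := by
  simp only [pv_keys_ofList, pv_update_ofList]

lemma pv_allKeys_nodup (nd : List (String × List (Int × Int))) (s : PySem.Set Int)
    (hs : s.Nodup) :
    (nd.foldl (fun s fd => PySem.Set.update s (PySem.Dict.ofList fd.2).keys) s).Nodup := by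
  induction nd generalizing s with
  | nil => exact hs
  | cons fd nd ih => exact ih _ (PySem.Set.nodup_update _ _ hs)

-- ===== VERDICT (by name: the statement is the Claim_ definition above) =====
theorem merge_nested_dict_spec : Claim_equal_merge_nested_dict := by
  intro nd _
  show merge_nested_dict nd = merge_nested_dict_alt nd
  unfold merge_nested_dict merge_nested_dict_alt
  simp only [pv_fold_triples]
  set allKeys : PySem.Set Int :=
    nd.foldl (fun s fd => PySem.Set.update s (PySem.Dict.ofList fd.2).keys) PySem.Set.empty with hAK
  set innerA : Int → PySem.Dict String Int := fun k =>
    nd.foldl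
      (fun inner fd =>
        if (PySem.Dict.ofList fd.2).contains k then
          inner.insert fd.1 ((PySem.Dict.ofList fd.2).getD k 0)
        else inner)
      PySem.Dict.empty with hIA
  have hnodup : allKeys.Nodup := pv_allKeys_nodup nd _ List.nodup_nil
  -- A's result
  have hA :
      (allKeys.foldl
        (fun res key =>
          nd.foldl
            (fun res fd =>
              if (PySem.Dict.ofList fd.2).contains key then
                res.modify key PySem.Dict.empty
                  (fun inner => inner.insert fd.1 ((PySem.Dict.ofList fd.2).getD key 0))
              else res)
            (res.insert key PySem.Dict.empty))
        PySem.Dict.empty).items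
      = allKeys.map (fun k => (k, innerA k)) := by
    have hstep :
        (fun (res : PySem.Dict Int (PySem.Dict String Int)) (key : Int) =>
          nd.foldl
            (fun res fd =>
              if (PySem.Dict.ofList fd.2).contains key then
                res.modify key PySem.Dict.empty
                  (fun inner => inner.insert fd.1 ((PySem.Dict.ofList fd.2).getD key 0))
              else res)
            (res.insert key PySem.Dict.empty))
        = fun res key => res.insert key (innerA key) := by
      funext res key
      exact pv_A_inner nd key res PySem.Dict.empty
    rw [hstep]
    have := PySem.Dict.items_foldl_insert_fresh allKeys (fun a => a) (fun a => innerA a)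
      PySem.Dict.empty (fun a _ => PySem.Dict.contains_empty a) (by simpa using hnodup)
    simpa using this
  -- B's result
  have hBkeys :
      (nd.foldl
        (fun res fd =>
          fd.2.foldl (fun res kv => res.modify kv.1 PySem.Dict.empty (fun inner => inner.insert fd.1 kv.2)) res)
        PySem.Dict.empty).keys = allKeys := by
    rw [pv_B_keys, PySem.Dict.keys_empty, hAK, pv_allKeys_raw]
    rfl
  have hB :
      (nd.foldl
        (fun res fd =>
          fd.2.foldl (fun res kv => res.modify kv.1 PySem.Dict.empty (fun inner => inner.insert fd.1 kv.2)) res)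
        PySem.Dict.empty).items
      = allKeys.map (fun k => (k, innerA k)) := by
    rw [PySem.Dict.items_eq_map_keys _ (by rw [hBkeys]; exact hnodup) PySem.Dict.empty, hBkeys]
    refine List.map_congr_left ?_
    intro k _
    rw [pv_B_getD, PySem.Dict.getD_empty, hIA]
  simp only [hA, hB]
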